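-- pv_equiv track=rewrite | github.com/hawaite/adventofcode2024 | day21/part2.py | prune_zig_zags
-- ===== SOURCE A (Python) =====
-- from itertools import pairwise, permutations, product
--
-- def prune_zig_zags(direction_path_list):
--     pruned_path_list = []
--
--     for direction_path in direction_path_list:
--         detected_change = False
--         valid = True
--         for node_one, node_two in pairwise(direction_path):
--             if node_one != node_two:
--                 # detected a change for a second time
--                 if detected_change:
--                     valid = False
--                     break
--                 else:
--                     detected_change = True
--         if valid:
--             pruned_path_list.append(direction_path)
--
--     return pruned_path_list
-- ===== SOURCE B (Python) =====
-- def prune_zig_zags(direction_path_list):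
--     # A path has at most one direction change iff it equals its "canonical
--     # two-run" form: all occurrences of the first character, followed by the
--     # last character filling the rest.  Rebuild that candidate string and
--     # compare for equality -- no pairwise scan, no change flag.
--     def _is_two_run(p):
--         if not p:
--             return True
--         k = p.count(p[0])
--         return p == p[0] * k + p[-1] * (len(p) - k)
--
--     return [p for p in direction_path_list if _is_two_run(p)]
-- ===== Notes on version B (the rewrite author's own statement) =====
-- stated objective: alternative
-- what changed: Instead of scanning adjacent pairs with a change-seen flag and early break, B rebuilds each path's canonical two-run form (first character repeated count(first) times, then the last character filling the rest) and keeps the path iff it equals that reconstruction.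
import Mathlib
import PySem

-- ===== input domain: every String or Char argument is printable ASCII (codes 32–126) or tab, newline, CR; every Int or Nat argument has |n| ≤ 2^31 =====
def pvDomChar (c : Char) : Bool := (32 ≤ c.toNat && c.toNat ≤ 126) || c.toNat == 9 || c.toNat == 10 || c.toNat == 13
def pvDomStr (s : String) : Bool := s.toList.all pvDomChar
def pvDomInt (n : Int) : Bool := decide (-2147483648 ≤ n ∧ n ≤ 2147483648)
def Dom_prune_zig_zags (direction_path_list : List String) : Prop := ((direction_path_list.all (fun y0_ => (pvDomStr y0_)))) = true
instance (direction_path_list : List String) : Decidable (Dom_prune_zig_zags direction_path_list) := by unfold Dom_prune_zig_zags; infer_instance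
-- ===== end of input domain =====

-- B replaces A's flag/early-break pairwise scan by reconstructing each path's
-- canonical two-run string and comparing for equality (alternative, same cost).

-- ===== PORT A =====
-- inner 'for node_one, node_two in pairwise(path)' loop with detected_change flag
-- and early break; returns the final 'valid'
def pvValidA : List Char → Bool → Bool
  | c1 :: c2 :: rest, detected =>
      if c1 ≠ c2 then
        if detected then false else pvValidA (c2 :: rest) true
      else pvValidA (c2 :: rest) detected
  | _, _ => true

def prune_zig_zags (direction_path_list : List String) : List String :=
  direction_path_list.foldl
    (fun pruned_path_list direction_path =>
      if pvValidA direction_path.toList false then pruned_path_list ++ [direction_path]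
      else pruned_path_list)
    []

-- ===== PORT B =====
-- _is_two_run(p): p.count(p[0]) on a 1-char needle is exactly the character
-- count (List.count); p[0]*k / p[-1]*(len(p)-k) are List.replicate; p[-1] on
-- the nonempty branch is the last character (getLastD).
def pvIsTwoRun (l : List Char) : Bool :=
  match l with
  | [] => true
  | h :: _ =>
      let k := l.count h
      l == List.replicate k h ++ List.replicate (l.length - k) (l.getLastD h)

def prune_zig_zags_alt (direction_path_list : List String) : List String :=
  direction_path_list.filter (fun p => pvIsTwoRun p.toList)

-- ===== PRECONDITION & SPEC =====
def Spec_prune_zig_zags (direction_path_list : List String) (out : List String) : Prop := out = prune_zig_zags_alt direction_path_list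
instance (direction_path_list : List String) (out : List String) : Decidable (Spec_prune_zig_zags direction_path_list out) := by unfold Spec_prune_zig_zags; infer_instance

-- ===== CLAIM (what is proved, stated in full; the proofs are below) =====
def Claim_equal_prune_zig_zags : Prop := ∀ (direction_path_list : List String), Dom_prune_zig_zags direction_path_list → Spec_prune_zig_zags direction_path_list (prune_zig_zags direction_path_list)

-- ===== LEMMAS AND PROOFS =====

-- proof-only helper: number of maximal runs
def pvRunCount : List Char → Nat
  | [] => 0
  | [_] => 1
  | a :: b :: t => (if a == b then 0 else 1) + pvRunCount (b :: t)

theorem pvRunCount_pos (a : Char) (t : List Char) : 1 ≤ pvRunCount (a :: t) := by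
  induction t generalizing a with
  | nil => simp [pvRunCount]
  | cons b t ih =>
      simp only [pvRunCount]
      have := ih b
      omega

theorem pvValidA_eq (l : List Char) (d : Bool) :
    pvValidA l d = decide (pvRunCount l ≤ if d then 1 else 2) := by
  induction l generalizing d with
  | nil => cases d <;> simp [pvValidA, pvRunCount]
  | cons a t ih =>
      cases t with
      | nil => cases d <;> simp [pvValidA, pvRunCount]
      | cons b t =>
          by_cases hab : a = b
          · simp [pvValidA, hab, ih, pvRunCount]
          · have hpos := pvRunCount_pos b t
            cases d <;>
              simp [pvValidA, hab, ih, pvRunCount] <;> omega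

theorem pvRunCount_cons_le (x : Char) (l : List Char) :
    pvRunCount (x :: l) ≤ 1 + pvRunCount l := by
  cases l with
  | nil => simp [pvRunCount]
  | cons c t => simp only [pvRunCount]; split <;> omega

theorem pvRunCount_append_le (a b : List Char) :
    pvRunCount (a ++ b) ≤ pvRunCount a + pvRunCount b := by
  induction a with
  | nil => simp
  | cons x a' ih =>
      cases a' with
      | nil =>
          simpa using pvRunCount_cons_le x b
      | cons c a'' =>
          have h1 : pvRunCount ((x :: c :: a'') ++ b)
              = (if x == c then 0 else 1) + pvRunCount ((c :: a'') ++ b) := by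
            simp [pvRunCount]
          have h2 : pvRunCount (x :: c :: a'')
              = (if x == c then 0 else 1) + pvRunCount (c :: a'') := by
            simp [pvRunCount]
          omega

theorem pvRunCount_replicate_le_one (n : Nat) (x : Char) :
    pvRunCount (List.replicate n x) ≤ 1 := by
  induction n with
  | zero => simp [pvRunCount]
  | succ n ih =>
      cases n with
      | zero => simp [pvRunCount]
      | succ m =>
          rw [List.replicate_succ, List.replicate_succ]
          simpa [pvRunCount, List.replicate_succ] using ih

theorem pvRunCount_le_one_const (b : Char) (t : List Char) :
    pvRunCount (b :: t) ≤ 1 → b :: t = List.replicate (t.length + 1) b := by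
  induction t generalizing b with
  | nil => intro _; simp
  | cons c t' ih =>
      intro h
      have hpos := pvRunCount_pos c t'
      simp only [pvRunCount] at h
      by_cases hbc : b = c
      · subst hbc
        have := ih b (by simpa using h)
        rw [List.replicate_succ]
        simpa using this
      · simp [hbc] at h; omega

theorem pvRunCount_decomp (h : Char) (t : List Char) :
    pvRunCount (h :: t) ≤ 2 →
    ∃ i j y, h :: t = List.replicate i h ++ List.replicate j y ∧ 1 ≤ i ∧ (j = 0 ∨ y ≠ h) := by
  induction t generalizing h with
  | nil =>
      intro _
      exact ⟨1, 0, h, by simp, le_refl 1, Or.inl rfl⟩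
  | cons b t' ih =>
      intro hrc
      by_cases hb : h = b
      · subst hb
        have h2 : pvRunCount (h :: t') ≤ 2 := by
          simpa [pvRunCount] using hrc
        obtain ⟨i, j, y, heq, hi, hjy⟩ := ih h h2
        refine ⟨i + 1, j, y, ?_, by omega, hjy⟩
        rw [List.replicate_succ]
        simp [heq]
      · have h1 : pvRunCount (b :: t') ≤ 1 := by
          simp only [pvRunCount] at hrc
          have : (if h == b then 0 else 1) = 1 := by simp [hb]
          omega
        have := pvRunCount_le_one_const b t' h1
        refine ⟨1, t'.length + 1, b, ?_, le_refl 1, Or.inr (fun hc => hb hc.symm)⟩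
        simp [this]

theorem getLastD_append_replicate_succ (xs : List Char) (j : Nat) (y d : Char) :
    (xs ++ List.replicate (j + 1) y).getLastD d = y := by
  rw [List.replicate_succ', ← List.append_assoc]
  simp

theorem pvIsTwoRun_iff (l : List Char) : pvIsTwoRun l = true ↔ pvRunCount l ≤ 2 := by
  cases l with
  | nil => simp [pvIsTwoRun, pvRunCount]
  | cons h t =>
      simp only [pvIsTwoRun, beq_iff_eq]
      constructor
      · intro heq
        have hle := pvRunCount_append_le (List.replicate ((h :: t).count h) h)
          (List.replicate ((h :: t).length - (h :: t).count h) ((h :: t).getLastD h))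
        rw [← heq] at hle
        have h1 := pvRunCount_replicate_le_one ((h :: t).count h) h
        have h2 := pvRunCount_replicate_le_one ((h :: t).length - (h :: t).count h) ((h :: t).getLastD h)
        omega
      · intro hrc
        obtain ⟨i, j, y, heq, hi, hjy⟩ := pvRunCount_decomp h t hrc
        have hcount : (h :: t).count h = i := by
          rw [heq, List.count_append, List.count_replicate_self, List.count_replicate]
          rcases hjy with hj | hy
          · simp [hj]
          · simp [hy]
        have hlen : (h :: t).length = i + j := by simp [heq]
        rw [hcount, hlen, show i + j - i = j from by omega]
        cases j with
        | zero => simpa using heq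
        | succ j' =>
            have hlast : (h :: t).getLastD h = y := by
              rw [heq]; exact getLastD_append_replicate_succ _ j' y h
            rw [hlast]; exact heq

-- ===== VERDICT (by name: the statement is the Claim_ definition above) =====
theorem prune_zig_zags_spec : Claim_equal_prune_zig_zags := by
  intro l _
  show _ = _
  unfold prune_zig_zags prune_zig_zags_alt
  rw [show (fun pruned p => if pvValidA p.toList false then pruned ++ [p] else pruned)
      = (fun (pruned : List String) p => if (fun q => pvIsTwoRun q.toList) p then pruned ++ [p] else pruned)
    from by
      funext pruned p
      rw [pvValidA_eq]
      by_cases hcase : pvRunCount p.toList ≤ 2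
      · simp [hcase, (pvIsTwoRun_iff p.toList).mpr hcase]
      · have hf : pvIsTwoRun p.toList = false := by
          cases hb : pvIsTwoRun p.toList
          · rfl
          · exact absurd ((pvIsTwoRun_iff _).mp hb) hcase
        simp [hcase, hf]]
  rw [PySem.List.foldl_append_ite_eq_filter]
  simp
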